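-- pv_equiv track=rewrite | github.com/KZunT/Problem-Solving | Programmers/Lv_3/최고의 집합.py | solution
-- ===== SOURCE A (Python) =====
-- def solution(n, s):
--     q, r = divmod(s, n)
--
--     if q == 0:
--         return [-1]
--
--     answer = [q] * n
--
--     for i in range(r):
--         answer[i] += 1
--
--     answer.sort()
--
--     return answer
-- ===== SOURCE B (Python) =====
-- def solution(n, s):
--     if s // n == 0:
--         return [-1]
--     answer = []
--     while n > 0:
--         part = s // n      # smallest possible next value keeps the rest distributable
--         answer.append(part)
--         s -= part
--         n -= 1
--     return answer
-- ===== Notes on version B (the rewrite author's own statement) =====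
-- stated objective: alternative
-- what changed: B abandons the divmod block construction, increment loop and sort: it emits the answer element by element with a greedy one-pass loop, each step appending s//n and recursing on the remaining sum over one fewer part, which yields the ascending sequence directly.
import Mathlib
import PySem

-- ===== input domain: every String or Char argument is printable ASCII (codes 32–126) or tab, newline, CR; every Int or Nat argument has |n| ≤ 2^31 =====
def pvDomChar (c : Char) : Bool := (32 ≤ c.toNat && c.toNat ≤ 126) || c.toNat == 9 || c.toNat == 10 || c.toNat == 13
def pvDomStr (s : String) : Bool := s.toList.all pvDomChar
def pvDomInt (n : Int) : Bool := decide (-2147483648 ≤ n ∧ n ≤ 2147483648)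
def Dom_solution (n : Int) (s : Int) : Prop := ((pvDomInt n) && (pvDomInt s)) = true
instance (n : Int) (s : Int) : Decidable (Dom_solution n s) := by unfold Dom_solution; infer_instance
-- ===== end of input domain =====

-- B replaces A's block construction (list of q's, increment loop, sort) by a greedy
-- one-pass loop that appends s//n and continues with the remaining sum over n-1 parts
-- (objective: alternative, no sort needed).

-- ===== PORT A =====
def solution (n : Int) (s : Int) : List Int :=
  match PySem.Int.divmod? s n with
  | none => []   -- unreachable: Pre_solution requires n ≠ 0 (Python raises ZeroDivisionError)
  | some (q, r) =>
    if q = 0 then [-1]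
    else
      let answer := PySem.List.pyRepeat [q] n
      let answer := (PySem.List.pyRange 0 r 1).foldl
        (fun acc i => PySem.List.pySetD acc i (PySem.List.pyGetD acc i 0 + 1)) answer
      PySem.List.sorted answer (fun x => x) false

-- ===== PORT B =====
-- the while loop of Source B: while n > 0: append s//n; s -= s//n; n -= 1
def solutionAltLoop (n : Int) (s : Int) (acc : List Int) : List Int :=
  if _h : 0 < n then
    solutionAltLoop (n - 1) (s - PySem.Int.floordiv s n) (acc ++ [PySem.Int.floordiv s n])
  else acc
termination_by n.toNat
decreasing_by omega

def solution_alt (n : Int) (s : Int) : List Int :=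
  if PySem.Int.floordiv s n = 0 then [-1]
  else solutionAltLoop n s []

-- ===== PRECONDITION & SPEC =====
-- Pre_ excludes n = 0, on which Python's divmod (A) and '//' (B) raise ZeroDivisionError.
def Pre_solution (n : Int) (s : Int) : Prop := n ≠ 0
instance (n : Int) (s : Int) : Decidable (Pre_solution n s) := by unfold Pre_solution; infer_instance
def pvWitness_solution : Int × Int := (3, 7)

def Spec_solution (n : Int) (s : Int) (out : List Int) : Prop := out = solution_alt n s
instance (n : Int) (s : Int) (out : List Int) : Decidable (Spec_solution n s out) := by unfold Spec_solution; infer_instance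

-- ===== CLAIM (what is proved, stated in full; the proofs are below) =====
def Claim_equal_solution : Prop := ∀ (n : Int) (s : Int), Dom_solution n s → Pre_solution n s → Spec_solution n s (solution n s)

-- ===== LEMMAS AND PROOFS =====

-- A side: after the loop over range(k) the list is k copies of q+1 followed by the rest q
lemma loop_incr (q : Int) (N : Nat) (k : Nat) (hk : k ≤ N) :
    (PySem.List.pyRange 0 (k : Int) 1).foldl
      (fun acc i => PySem.List.pySetD acc i (PySem.List.pyGetD acc i 0 + 1))
      (List.replicate N q)
    = List.replicate k (q + 1) ++ List.replicate (N - k) q := by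
  induction k with
  | zero => simp [PySem.List.pyRange_one_eq_nil]
  | succ k ih =>
    have hk' : k ≤ N := Nat.le_of_succ_le hk
    have hsplit : PySem.List.pyRange 0 ((k : Int) + 1) 1
        = PySem.List.pyRange 0 (k : Int) 1 ++ [(k : Int)] :=
      PySem.List.pyRange_one_succ_right (by exact_mod_cast Nat.zero_le k)
    have hcast : ((k + 1 : Nat) : Int) = (k : Int) + 1 := by push_cast; ring
    rw [hcast, hsplit, List.foldl_append, ih hk']
    simp only [List.foldl_cons, List.foldl_nil]
    have hget : PySem.List.pyGetD
        (List.replicate k (q + 1) ++ List.replicate (N - k) q) (k : Int) 0 = q := by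
      rw [PySem.List.pyGetD_natCast]
      rw [List.getD_eq_getElem _ _ (by simp; omega)]
      rw [List.getElem_append_right (by simp)]
      simp
    rw [hget, PySem.List.pySetD_natCast]
    apply List.ext_getElem
    · simp; omega
    · intro i h1 h2
      by_cases hi : i = k
      · subst hi
        rw [List.getElem_set_self]
        rw [List.getElem_append_left (by simp)]
        simp
      · rw [List.getElem_set_ne (by omega)]
        by_cases hlt : i < k
        · rw [List.getElem_append_left (by simpa), List.getElem_append_left (by simp; omega)]
          simp
        · rw [List.getElem_append_right (by simp; omega), List.getElem_append_right (by simp; omega)]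
          simp

-- A side: sorted of (R copies of q+1 ++ M copies of q) is (M copies of q ++ R copies of q+1)
lemma sorted_blocks (q : Int) (R M : Nat) :
    PySem.List.sorted (List.replicate R (q + 1) ++ List.replicate M q) (fun x => x) false
    = List.replicate M q ++ List.replicate R (q + 1) := by
  apply PySem.List.sorted_id_eq_of_perm_of_pairwise
  · exact List.perm_append_comm
  · simp [List.pairwise_append, List.mem_replicate, List.pairwise_replicate]

-- B side: for n > 0 the greedy loop produces (n-r) copies of q then r copies of q+1
lemma altLoop_char (N : Nat) : ∀ (n s : Int) (acc : List Int), n.toNat = N → 0 < n →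
    solutionAltLoop n s acc
    = acc ++ List.replicate (n - PySem.Int.mod s n).toNat (PySem.Int.floordiv s n)
          ++ List.replicate (PySem.Int.mod s n).toNat (PySem.Int.floordiv s n + 1) := by
  induction N with
  | zero => intro n s acc hN hpos; omega
  | succ N ih =>
    intro n s acc hN hpos
    set q := PySem.Int.floordiv s n with hq
    set r := PySem.Int.mod s n with hrr
    have heq : q * n + r = s := PySem.Int.floordiv_mul_add_mod s n
    have hr0 : 0 ≤ r := hrr ▸ PySem.Int.mod_nonneg (a := s) (b := n) hpos
    have hrlt : r < n := hrr ▸ PySem.Int.mod_lt (a := s) (b := n) hpos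
    rw [solutionAltLoop]
    simp only [hpos, dif_pos, ← hq]
    by_cases hn1 : n = 1
    · -- last iteration: loop stops
      subst hn1
      rw [solutionAltLoop]
      have hr : r = 0 := by omega
      have hq1 : q = s := by omega
      simp [hr, hq1]
    · -- n - 1 > 0: one step then induction hypothesis
      have hpos' : 0 < n - 1 := by omega
      have hs' : s - q = q * (n - 1) + r := by ring_nf; omega
      by_cases hcase : r < n - 1
      · have hfd : PySem.Int.floordiv (s - q) (n - 1) = q := by
          rw [PySem.Int.floordiv_eq_iff_of_pos hpos']
          constructor <;> nlinarith
        have hmd : PySem.Int.mod (s - q) (n - 1) = r := by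
          have := PySem.Int.floordiv_mul_add_mod (s - q) (n - 1)
          rw [hfd] at this; omega
        rw [ih (n - 1) (s - q) (acc ++ [q]) (by omega) hpos', hfd, hmd]
        have h1 : (n - 1 - r).toNat + 1 = (n - r).toNat := by omega
        rw [← h1, List.replicate_succ]
        simp
      · -- r = n - 1: remaining sum is (q+1)*(n-1)
        have hre : r = n - 1 := by omega
        have hfd : PySem.Int.floordiv (s - q) (n - 1) = q + 1 := by
          rw [PySem.Int.floordiv_eq_iff_of_pos hpos']
          constructor <;> nlinarith
        have hmd : PySem.Int.mod (s - q) (n - 1) = 0 := by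
          have := PySem.Int.floordiv_mul_add_mod (s - q) (n - 1)
          rw [hfd] at this
          have hx : (q + 1) * (n - 1) = q * (n - 1) + (n - 1) := by ring
          omega
        rw [ih (n - 1) (s - q) (acc ++ [q]) (by omega) hpos', hfd, hmd]
        have h1 : (n - r).toNat = 1 := by omega
        have h2 : (n - 1 - 0).toNat = r.toNat := by omega
        rw [h1, h2]
        simp [List.replicate_succ]

-- ===== VERDICT (by name: the statement is the Claim_ definition above) =====
theorem solution_spec : Claim_equal_solution := by
  intro n s _ hpre
  unfold Spec_solution solution solution_alt
  have hdm : PySem.Int.divmod? s n = some (PySem.Int.floordiv s n, PySem.Int.mod s n) := by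
    simp [PySem.Int.divmod?, PySem.Int.floordiv, PySem.Int.mod]
    exact hpre
  rw [hdm]
  simp only
  set q := PySem.Int.floordiv s n with hq
  set r := PySem.Int.mod s n with hr
  clear_value q r
  by_cases hq0 : q = 0
  · simp [hq0]
  · simp only [hq0, if_false]
    rw [PySem.List.pyRepeat_singleton]
    rcases lt_or_gt_of_ne hpre with hneg | hpos
    · -- n < 0 : both sides empty
      have hb := PySem.Int.mod_neg_bounds (a := s) (b := n) hneg
      have h1 : n.toNat = 0 := by omega
      have h4 : PySem.List.pyRange 0 r 1 = [] :=
        PySem.List.pyRange_one_eq_nil (by omega)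
      rw [h1, h4]
      rw [solutionAltLoop, dif_neg (by omega : ¬ 0 < n)]
      simp [PySem.List.sorted_eq_nil_iff]
    · -- n > 0 : 0 ≤ r < n
      have hrn : 0 ≤ r := hr ▸ PySem.Int.mod_nonneg (a := s) (b := n) (by omega)
      have hrlt : r < n := hr ▸ PySem.Int.mod_lt (a := s) (b := n) (by omega)
      have hcast : r = ((r.toNat : Nat) : Int) := by omega
      have hk : r.toNat ≤ n.toNat := by omega
      rw [hcast, loop_incr q n.toNat r.toNat hk, sorted_blocks]
      rw [altLoop_char n.toNat n s [] rfl hpos, ← hq, ← hr]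
      have h5 : (n - r).toNat = n.toNat - r.toNat := by omega
      simp [h5]
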